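-- pv_equiv track=rewrite | github.com/sasumko/xlsx2json | src/jkLib/jkCommonLib.py | GetCamelString
-- ===== SOURCE A (Python) =====
-- def IsEmpty (_str):
--     return not bool(_str and _str.strip())
--
-- def GetCamelString (_str):
--     if IsEmpty(_str) == True:
--         return ""
--
--     _ret = ""
--     for _tok in _str.split(' '):
--         _add = _tok.title()
--
--         _ret = _ret + _add
--     return _ret
-- ===== SOURCE B (Python) =====
-- def GetCamelString(_str):
--     # Same emptiness guard as the original; then a single character pass:
--     # a char is upper-cased iff the char before it (or start of string) is
--     # not a letter -- exactly the per-token str.title() boundary rule --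
--     # and spaces are dropped on the fly.
--     if not (_str and _str.strip()):
--         return ""
--     out = []
--     prev_alpha = False
--     for c in _str:
--         if c != ' ':
--             out.append((c.lower() if prev_alpha else c.upper()) if c.isalpha() else c)
--         prev_alpha = c.isalpha()
--     return ''.join(out)
-- ===== Notes on version B (the rewrite author's own statement) =====
-- stated objective: alternative
-- what changed: Replaces split-on-space + per-token str.title() + repeated string concatenation by one linear character pass that tracks whether the previous character was a letter, casing and dropping spaces on the fly.
import Mathlib
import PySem

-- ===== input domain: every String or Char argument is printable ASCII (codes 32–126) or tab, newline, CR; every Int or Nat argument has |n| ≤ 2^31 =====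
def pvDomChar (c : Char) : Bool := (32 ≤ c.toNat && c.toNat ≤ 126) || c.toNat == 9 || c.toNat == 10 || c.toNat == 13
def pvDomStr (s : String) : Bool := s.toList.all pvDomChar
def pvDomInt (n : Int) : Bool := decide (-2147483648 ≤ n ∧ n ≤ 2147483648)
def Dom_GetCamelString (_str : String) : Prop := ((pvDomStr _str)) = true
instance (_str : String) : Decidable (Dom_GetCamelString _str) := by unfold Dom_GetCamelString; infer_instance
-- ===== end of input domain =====

-- B replaces split-on-space + per-token str.title() + repeated concatenation by one
-- linear character pass tracking whether the previous character was a letter (objective: alternative).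

-- shared helpers: hand port of Python's ASCII casing / str.title() per-character rule
-- (exact on the ASCII domain: Python's cased characters there are exactly a-z, A-Z)
def pyIsAlpha (c : Char) : Bool := ('a' ≤ c && c ≤ 'z') || ('A' ≤ c && c ≤ 'Z')

def pyLowerC (c : Char) : Char := if 'A' ≤ c && c ≤ 'Z' then Char.ofNat (c.toNat + 32) else c

def pyUpperC (c : Char) : Char := if 'a' ≤ c && c ≤ 'z' then Char.ofNat (c.toNat - 32) else c

-- ===== PORT A =====
-- hand port of str.title() (exact on ASCII: a letter is upper-cased iff the previous
-- character is not a letter, lower-cased otherwise)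
def pyTitleAux (prev : Bool) : List Char → List Char
  | [] => []
  | c :: t =>
      (if pyIsAlpha c then (if prev then pyLowerC c else pyUpperC c) else c)
        :: pyTitleAux (pyIsAlpha c) t

def pyTitle (s : String) : String := String.ofList (pyTitleAux false s.toList)

-- port of IsEmpty: not bool(_str and _str.strip())
def IsEmptyPort (s : String) : Bool := !(s ≠ "" && PySem.Str.strip s ≠ "")

def GetCamelString (_str : String) : String :=
  if IsEmptyPort _str = true then ""
  else
    ((PySem.Str.split? _str " ").getD []).foldl (fun _ret _tok => _ret ++ pyTitle _tok) ""

-- ===== PORT B =====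
-- loop body of B's single pass: append the cased char unless it is a space,
-- remember whether this char was a letter
def camelStep (st : List Char × Bool) (c : Char) : List Char × Bool :=
  ((if c ≠ ' ' then
      st.1 ++ [if pyIsAlpha c then (if st.2 then pyLowerC c else pyUpperC c) else c]
    else st.1), pyIsAlpha c)

def GetCamelString_alt (_str : String) : String :=
  if !(_str ≠ "" && PySem.Str.strip _str ≠ "") then ""
  else String.ofList (_str.toList.foldl camelStep ([], false)).1

-- ===== PRECONDITION & SPEC =====
def Spec_GetCamelString (_str : String) (out : String) : Prop := out = GetCamelString_alt _str
instance (_str : String) (out : String) : Decidable (Spec_GetCamelString _str out) := by unfold Spec_GetCamelString; infer_instance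

-- ===== CLAIM (what is proved, stated in full; the proofs are below) =====
def Claim_equal_GetCamelString : Prop := ∀ (_str : String), Dom_GetCamelString _str → Spec_GetCamelString _str (GetCamelString _str)

-- ===== LEMMAS AND PROOFS =====

-- splitSp l = (first space-separated token of l, remaining tokens)
def splitSp : List Char → List Char × List (List Char)
  | [] => ([], [])
  | c :: t =>
      if c = ' ' then ([], (splitSp t).1 :: (splitSp t).2)
      else (c :: (splitSp t).1, (splitSp t).2)

-- B's loop as a structural recursion
def camelAux (prev : Bool) : List Char → List Char
  | [] => []
  | c :: t =>
      (if c ≠ ' ' then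
          [if pyIsAlpha c then (if prev then pyLowerC c else pyUpperC c) else c]
        else []) ++ camelAux (pyIsAlpha c) t

theorem camel_foldl_eq (l : List Char) (out : List Char) (prev : Bool) :
    (l.foldl camelStep (out, prev)).1 = out ++ camelAux prev l := by
  induction l generalizing out prev with
  | nil => simp [camelAux]
  | cons c t ih =>
      by_cases hc : c = ' ' <;>
        simp [camelAux, camelStep, hc, ih, List.append_assoc]

theorem splitOn_go_eq (l : List Char) (fuel : Nat) (cur : List Char)
    (acc : List (List Char)) (h : l.length ≤ fuel) :
    PySem.Chars.splitOn.go [' '] fuel l cur acc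
      = acc.reverse ++ (cur.reverse ++ (splitSp l).1) :: (splitSp l).2 := by
  induction l generalizing fuel cur acc with
  | nil =>
      cases fuel <;> simp [PySem.Chars.splitOn.go, splitSp]
  | cons c t ih =>
      cases fuel with
      | zero => simp at h
      | succ f =>
          have h' : t.length ≤ f := by simpa using h
          by_cases hc : c = ' '
          · subst hc
            simp only [PySem.Chars.splitOn.go]
            rw [if_pos (by simp)]
            simp only [List.length_singleton, List.drop_succ_cons, List.drop_zero]
            rw [ih f [] (cur.reverse :: acc) h']
            simp [splitSp]
          · simp only [PySem.Chars.splitOn.go]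
            rw [if_neg (by simp [List.isPrefixOf, Ne.symm hc])]
            rw [ih f (c :: cur) acc h']
            simp [splitSp, hc]

theorem splitOn_space (l : List Char) :
    PySem.Chars.splitOn l [' '] = (splitSp l).1 :: (splitSp l).2 := by
  have := splitOn_go_eq l (l.length + 1) [] [] (by omega)
  simpa [PySem.Chars.splitOn] using this

theorem camel_eq_titles (l : List Char) (prev : Bool) :
    camelAux prev l
      = pyTitleAux prev (splitSp l).1
          ++ ((splitSp l).2.map (pyTitleAux false)).flatten := by
  induction l generalizing prev with
  | nil => simp [camelAux, splitSp, pyTitleAux]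
  | cons c t ih =>
      by_cases hc : c = ' '
      · subst hc
        simp [camelAux, splitSp, pyTitleAux, ih, pyIsAlpha]
      · simp [camelAux, splitSp, hc, pyTitleAux, ih]

theorem foldl_title_toList (ts : List (List Char)) (b : String) :
    ((ts.map String.ofList).foldl (fun r t => r ++ pyTitle t) b).toList
      = b.toList ++ (ts.map (pyTitleAux false)).flatten := by
  induction ts generalizing b with
  | nil => simp
  | cons t ts ih =>
      rw [List.map_cons, List.foldl_cons, ih]
      simp [pyTitle, String.toList_append, String.toList_ofList]

-- ===== VERDICT (by name: the statement is the Claim_ definition above) =====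
theorem GetCamelString_spec : Claim_equal_GetCamelString := by
  intro s _
  unfold Spec_GetCamelString GetCamelString GetCamelString_alt IsEmptyPort
  split_ifs with h
  · rfl
  · apply String.toList_injective
    have hsplit : PySem.Str.split? s " " = some ((PySem.Chars.splitOn s.toList [' ']).map String.ofList) := by
      simp [PySem.Str.split?, PySem.Chars.split?]
    rw [hsplit]
    simp only [Option.getD_some, splitOn_space]
    rw [foldl_title_toList ((splitSp s.toList).1 :: (splitSp s.toList).2) ""]
    rw [camel_foldl_eq s.toList [] false]
    simp [String.toList_ofList, camel_eq_titles]
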